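-- pv_equiv track=rewrite | github.com/niranjansd/project-euler | 0040.py | dn
-- ===== SOURCE A (Python) =====
-- def dn(n):
--     start = 0
--     lennum = 1
--     while n >= 0:
--         end = int("".join(['9']*lennum))
--         numnum = ((end-start)+1)*lennum
--         if n <= numnum:
--             nth = n // lennum + start
--             return int(str(nth)[n % lennum])
--         start = end+1
--         n -= numnum
--         lennum += 1
-- ===== SOURCE B (Python) =====
-- def dn(n):
--     if n < 0:
--         return None
--
--     def cum(m):
--         # number of digits in the concatenation of the decimal strings of all numbers below m
--         total, p = m, 10
--         while p < m:
--             total += m - p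
--             p *= 10
--         return total
--
--     # binary search for the number lo whose digits cover position n
--     lo, hi = 0, n + 1
--     while hi - lo > 1:
--         mid = (lo + hi) // 2
--         if cum(mid) <= n:
--             lo = mid
--         else:
--             hi = mid
--     return int(str(lo)[n - cum(lo)])
-- ===== Notes on version B (the rewrite author's own statement) =====
-- stated objective: alternative
-- what changed: B replaces A's iterative block elimination (walking digit-length blocks, subtracting each block's size from n) by a binary search for the number whose digits cover position n, using a closed-form digit-count function cum(m) = m + sum of (m - 10^j) over 10^j < m, then indexes into str of that number.
-- outside the precondition, e.g. on dn(-1): A returns None, B returns None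
import Mathlib
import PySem

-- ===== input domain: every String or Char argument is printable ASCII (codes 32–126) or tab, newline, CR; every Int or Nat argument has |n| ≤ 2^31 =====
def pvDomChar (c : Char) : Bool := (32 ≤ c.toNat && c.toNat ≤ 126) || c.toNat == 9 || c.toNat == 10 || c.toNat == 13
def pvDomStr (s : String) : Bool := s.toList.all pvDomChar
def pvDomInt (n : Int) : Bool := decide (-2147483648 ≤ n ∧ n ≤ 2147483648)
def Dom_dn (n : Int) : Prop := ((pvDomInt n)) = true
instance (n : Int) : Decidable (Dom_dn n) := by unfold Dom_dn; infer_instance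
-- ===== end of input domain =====

-- B replaces A's iterative block elimination by a binary search for the number whose digits
-- cover position n, with a closed-form digit-count function; objective: alternative, not faster.

-- ===== PORT A =====
def dnA : Nat → Int → Int → Int → Int
  | 0, _, _, _ => 0
  | fuel+1, start, lennum, n =>
    if 0 ≤ n then
      let e : Int := (PySem.Int.ofChars? (List.replicate lennum.toNat '9')).getD 0
      let numnum : Int := ((e - start) + 1) * lennum
      if n ≤ numnum then
        let nth : Int := PySem.Int.floordiv n lennum + start
        ((PySem.List.pyGet? (PySem.Int.toChars nth) (PySem.Int.mod n lennum)).bind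
          (fun c => PySem.Int.ofChars? [c])).getD 0
      else dnA fuel (e + 1) (lennum + 1) (n - numnum)
    else 0

def dn (n : Int) : Int := dnA 64 0 1 n

-- ===== PORT B =====
-- cum(m): digits in the concatenation of the decimal strings of all numbers below m (the inner while loop of Source B)
def cumB : Nat → Int → Int → Int → Int
  | 0, _, total, _ => total
  | fuel+1, m, total, p => if p < m then cumB fuel m (total + (m - p)) (p * 10) else total

-- the binary-search loop of Source B
def dnBs : Nat → Int → Int → Int → Int
  | 0, _, lo, _ => lo
  | fuel+1, n, lo, hi =>
    if 1 < hi - lo then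
      let mid := PySem.Int.floordiv (lo + hi) 2
      if cumB 64 mid mid 10 ≤ n then dnBs fuel n mid hi else dnBs fuel n lo mid
    else lo

def dn_alt (n : Int) : Int :=
  if n < 0 then 0
  else
    let lo := dnBs 64 n 0 (n + 1)
    ((PySem.List.pyGet? (PySem.Int.toChars lo) (n - cumB 64 lo lo 10)).bind
      (fun c => PySem.Int.ofChars? [c])).getD 0

-- ===== PRECONDITION & SPEC =====
-- Pre_ excludes n < 0, on which A's while-loop never runs and A returns None (not an int).
def Pre_dn (n : Int) : Prop := 0 ≤ n
instance (n : Int) : Decidable (Pre_dn n) := by unfold Pre_dn; infer_instance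
def pvWitness_dn : Int := 5

def Spec_dn (n : Int) (out : Int) : Prop := out = dn_alt n
instance (n : Int) (out : Int) : Decidable (Spec_dn n out) := by unfold Spec_dn; infer_instance

-- ===== CLAIM (what is proved, stated in full; the proofs are below) =====
def Claim_equal_dn : Prop := ∀ (n : Int), Dom_dn n → Pre_dn n → Spec_dn n (dn n)

-- ===== LEMMAS AND PROOFS =====

-- block bookkeeping: numbers of d digits are [startN d, 10^d); cntN d of them;
-- totalN d = digits of the concatenation before the d-digit block begins
def startN (d : Nat) : Nat := if d = 1 then 0 else 10 ^ (d - 1)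
def cntN (d : Nat) : Nat := 10 ^ d - startN d
def totalN : Nat → Nat
  | 0 => 0
  | 1 => 0
  | d + 1 => totalN d + cntN d * d

-- number of digits of str(m), and the cumulative digit count of all earlier numbers
def numD (m : Nat) : Nat := (PySem.Int.toChars (m : Int)).length
def cum : Nat → Nat
  | 0 => 0
  | m + 1 => cum m + numD m

-- the common return expression: the (n - cum j)-th character of str(j), as an int
def retB (j : Nat) (n : Int) : Int :=
  ((PySem.List.pyGet? (PySem.Int.toChars (j : Int)) (n - (cum j : Int))).bind
    (fun c => PySem.Int.ofChars? [c])).getD 0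

def digitsBE (d m : Nat) : List Char :=
  (List.range d).map (fun r => Nat.digitChar (m / 10 ^ (d - 1 - r) % 10))

lemma nines (k : Nat) (h1 : 1 ≤ k) (h2 : k ≤ 10) :
    PySem.Int.ofChars? (List.replicate k '9') = some ((10 : Int) ^ k - 1) := by
  interval_cases k <;> rfl

lemma digitsBE_succ (d m : Nat) :
    digitsBE (d + 1) m = digitsBE d (m / 10) ++ [Nat.digitChar (m % 10)] := by
  unfold digitsBE
  rw [List.range_succ, List.map_append]
  congr 1
  · apply List.map_congr_left
    intro r hr
    rw [List.mem_range] at hr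
    congr 2
    rw [Nat.div_div_eq_div_mul]
    congr 1
    rw [← pow_succ']
    congr 1
    omega
  · simp

lemma toDigitsCore_eq (d : Nat) : ∀ (m : Nat) (acc : List Char) (fuel : Nat), 1 ≤ d → d ≤ fuel →
    m < 10 ^ d → (10 ^ (d - 1) ≤ m ∨ d = 1) →
    Nat.toDigitsCore 10 fuel m acc = digitsBE d m ++ acc := by
  induction d with
  | zero => omega
  | succ d ih =>
    intro m acc fuel _ hfuel hm hlo
    obtain ⟨fuel, rfl⟩ : ∃ f, fuel = f + 1 := ⟨fuel - 1, by omega⟩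
    rw [Nat.toDigitsCore]
    by_cases hd : d = 0
    · subst hd
      have h10 : m / 10 = 0 := by
        apply Nat.div_eq_of_lt; simpa using hm
      simp [h10, digitsBE]
    · have hge : 10 ^ d ≤ m := by
        rcases hlo with h | h
        · simpa using h
        · omega
      have hne : m / 10 ≠ 0 := by
        have : 10 ≤ m := le_trans (by calc 10 = 10^1 := (pow_one 10).symm
                                         _ ≤ 10 ^ d := Nat.pow_le_pow_right (by norm_num) (by omega)) hge
        omega
      rw [if_neg hne]
      rw [ih (m / 10) _ fuel (by omega) (by omega)
          (by rw [Nat.div_lt_iff_lt_mul (by norm_num)]; calc m < 10 ^ (d+1) := hm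
              _ = 10 ^ d * 10 := by ring)
          (Or.inl (by rw [Nat.le_div_iff_mul_le (by norm_num)]
                      calc 10 ^ (d-1) * 10 = 10 ^ d := by rw [← pow_succ]; congr 1; omega
                        _ ≤ m := hge))]
      rw [digitsBE_succ]
      simp

lemma toDigits_eq_digitsBE (d m : Nat) (hd : 1 ≤ d) (hm : m < 10 ^ d)
    (hlo : 10 ^ (d - 1) ≤ m ∨ d = 1) : Nat.toDigits 10 m = digitsBE d m := by
  rw [Nat.toDigits, toDigitsCore_eq d m [] (m+1) hd ?_ hm hlo, List.append_nil]
  rcases hlo with h | h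
  · have : d - 1 < 10 ^ (d - 1) := Nat.lt_pow_self (by norm_num)
    omega
  · omega

lemma toChars_eq (d m : Nat) (hd : 1 ≤ d) (hm : m < 10 ^ d)
    (hlo : 10 ^ (d - 1) ≤ m ∨ d = 1) : PySem.Int.toChars (m : Int) = digitsBE d m := by
  unfold PySem.Int.toChars
  rw [if_neg (by omega), Int.toNat_natCast]
  exact toDigits_eq_digitsBE d m hd hm hlo

lemma numD_eq (d m : Nat) (hd : 1 ≤ d) (hm : m < 10 ^ d)
    (hlo : 10 ^ (d - 1) ≤ m ∨ d = 1) : numD m = d := by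
  unfold numD
  rw [toChars_eq d m hd hm hlo]
  simp [digitsBE]

lemma numD_in_block (d j : Nat) (hd : 1 ≤ d) (hj : j < cntN d) : numD (startN d + j) = d := by
  have hsc : startN d + cntN d = 10 ^ d := by
    have : startN d ≤ 10 ^ d := by
      unfold startN; split
      · positivity
      · exact Nat.pow_le_pow_right (by norm_num) (by omega)
    unfold cntN; omega
  apply numD_eq d _ hd (by omega)
  by_cases h : d = 1
  · right; exact h
  · left
    have : startN d = 10 ^ (d - 1) := by unfold startN; rw [if_neg h]
    omega

lemma totalN_succ (d : Nat) (hd : 1 ≤ d) : totalN (d + 1) = totalN d + cntN d * d := by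
  obtain ⟨d, rfl⟩ : ∃ e, d = e + 1 := ⟨d - 1, by omega⟩
  rfl

lemma startN_succ (d : Nat) (hd : 1 ≤ d) : startN (d + 1) = 10 ^ d := by
  unfold startN; rw [if_neg (by omega)]; congr 1

lemma startN_add_cntN (d : Nat) : startN d + cntN d = 10 ^ d := by
  have : startN d ≤ 10 ^ d := by
    unfold startN; split
    · positivity
    · exact Nat.pow_le_pow_right (by norm_num) (by omega)
  unfold cntN; omega

lemma numnum_cast (d : Nat) : ((10:Int) ^ d - 1 - (startN d : Int) + 1) * d = ((cntN d * d : Nat) : Int) := by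
  have h := startN_add_cntN d
  have hle : startN d ≤ 10 ^ d := by omega
  have hc : (cntN d : Int) = 10 ^ d - (startN d : Int) := by
    unfold cntN
    rw [Nat.cast_sub hle]
    push_cast; ring
  push_cast [hc]; ring

lemma totalN_succ_cast (d : Nat) (hd : 1 ≤ d) :
    ((totalN (d + 1) : Nat) : Int) = (totalN d : Int) + ((cntN d * d : Nat) : Int) := by
  rw [totalN_succ d hd]; push_cast; ring

-- cum of the first number of each block, and its in-block closed form
lemma cum_block (d : Nat) (hd : 1 ≤ d) (hbase : cum (startN d) = totalN d) :
    ∀ j, j ≤ cntN d → cum (startN d + j) = totalN d + j * d := by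
  intro j
  induction j with
  | zero => intro _; simpa using hbase
  | succ j ih =>
    intro hj
    have h1 : startN d + (j + 1) = (startN d + j) + 1 := by omega
    rw [h1]
    show cum (startN d + j) + numD (startN d + j) = _
    rw [ih (by omega), numD_in_block d j hd (by omega)]
    ring

lemma cum_start : ∀ d, 1 ≤ d → d ≤ 10 → cum (startN d) = totalN d := by
  intro d
  induction d with
  | zero => omega
  | succ d ih =>
    intro _ hle
    by_cases hd : d = 0
    · subst hd; rfl
    · have h1 : cum (startN d) = totalN d := ih (by omega) (by omega)
      have h2 := cum_block d (by omega) h1 (cntN d) le_rfl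
      rw [startN_succ d (by omega), ← startN_add_cntN d, h2, totalN_succ d (by omega)]

lemma start_le_total : ∀ d, d < 11 → 1 ≤ d → startN d ≤ totalN d := by decide

-- A's return inside (or at the upper edge of) the d-digit block is retB j n for the
-- number j whose digits cover position n
lemma ablock (fuel d : Nat) (n : Int) (hd : 1 ≤ d) (hdle : d ≤ 9)
    (hlo : (totalN d : Int) ≤ n) (hhi : n ≤ (totalN (d + 1) : Int)) :
    ∃ j : Nat, (cum j : Int) ≤ n ∧ n < (cum (j + 1) : Int) ∧ j ≤ n.toNat ∧
      dnA (fuel + 1) (startN d) (d : Int) (n - (totalN d : Int)) = retB j n := by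
  obtain ⟨offN, hoff⟩ : ∃ o : Nat, n - (totalN d : Int) = (o : Int) := ⟨(n - totalN d).toNat, by omega⟩
  have hoffle : offN ≤ cntN d * d := by
    have : (offN : Int) ≤ ((cntN d * d : Nat) : Int) := by
      rw [← hoff]; rw [totalN_succ_cast d hd] at hhi; linarith
    exact_mod_cast this
  set q := offN / d with hq
  set r := offN % d with hr
  have hqd : q * d + r = offN := by rw [hq, hr, Nat.mul_comm]; exact Nat.div_add_mod offN d
  have hqle : q ≤ cntN d := by
    have := Nat.div_le_div_right (c := d) hoffle
    rwa [Nat.mul_div_cancel _ (by omega : 0 < d)] at this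
  refine ⟨startN d + q, ?_, ?_, ?_, ?_⟩
  case _ =>
    rw [cum_block d hd (cum_start d hd (by omega)) q hqle]
    have : (totalN d : Int) + ((q * d : Nat) : Int) ≤ n := by
      have : ((q * d : Nat) : Int) ≤ (offN : Int) := by exact_mod_cast (by omega : q * d ≤ offN)
      omega
    push_cast at this ⊢; linarith
  case _ =>
    by_cases hcase : q < cntN d
    · have h1 : cum (startN d + q + 1) = cum (startN d + q) + numD (startN d + q) := rfl
      rw [h1, cum_block d hd (cum_start d hd (by omega)) q hqle, numD_in_block d q hd hcase]
      have hrlt : r < d := Nat.mod_lt _ (by omega)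
      have : n < (totalN d : Int) + ((q * d + d : Nat) : Int) := by
        have : (offN : Int) < ((q * d + d : Nat) : Int) := by exact_mod_cast (by omega : offN < q * d + d)
        omega
      push_cast at this ⊢; linarith
    · -- boundary: q = cntN d, so n = totalN (d+1) and j = 10^d
      have hqe : q = cntN d := by omega
      have hoffe : offN = cntN d * d := by
        have h2 : q * d ≤ offN := by omega
        rw [hqe] at h2
        omega
      have hne : n = (totalN (d + 1) : Int) := by
        rw [totalN_succ_cast d hd]
        have h := hoff
        rw [hoffe] at h
        omega
      have hj : startN d + q = startN (d + 1) := by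
        rw [hqe, startN_add_cntN d, startN_succ d hd]
      have hcnt : 0 < cntN (d + 1) := by
        have := startN_add_cntN (d + 1)
        have hlt : startN (d + 1) < 10 ^ (d + 1) := by
          rw [startN_succ d hd]
          exact Nat.pow_lt_pow_right (by norm_num) (by omega)
        omega
      have hnd : numD (startN (d + 1)) = d + 1 := by
        have := numD_in_block (d + 1) 0 (by omega) hcnt
        simpa using this
      have h1 : cum (startN d + q + 1) = cum (startN d + q) + numD (startN d + q) := rfl
      rw [h1, hj, cum_start (d + 1) (by omega) (by omega), hnd, hne]
      push_cast
      omega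
  case _ =>
    have h2 : startN d + q ≤ totalN d + q * d := by
      have hst := start_le_total d (by omega) hd
      have hqq : q ≤ q * d := Nat.le_mul_of_pos_right _ (by omega)
      omega
    have h3 : ((totalN d + q * d : Nat) : Int) ≤ n := by
      have hle : ((q * d : Nat) : Int) ≤ (offN : Int) := by exact_mod_cast (by omega : q * d ≤ offN)
      push_cast at hle ⊢; omega
    have h4 : ((startN d + q : Nat) : Int) ≤ n := by
      have hcast : ((startN d + q : Nat) : Int) ≤ ((totalN d + q * d : Nat) : Int) := by exact_mod_cast h2
      omega
    omega
  case _ =>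
    rw [dnA]
    simp only []
    rw [if_pos (by omega)]
    rw [Int.toNat_natCast, nines d hd (by omega)]
    simp only [Option.getD_some]
    rw [numnum_cast d, hoff]
    rw [if_pos (by exact_mod_cast hoffle)]
    rw [PySem.Int.floordiv_natCast, PySem.Int.mod_natCast]
    unfold retB
    have hsum : ((offN / d : Nat) : Int) + (startN d : Int) = ((startN d + q : Nat) : Int) := by
      rw [hq]; push_cast; ring
    have hidx : ((offN % d : Nat) : Int) = n - ((cum (startN d + q) : Nat) : Int) := by
      rw [cum_block d hd (cum_start d hd (by omega)) q hqle]
      have h5 : offN % d = offN - q * d := by omega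
      have h6 : q * d ≤ offN := by omega
      rw [h5, Nat.cast_sub h6]
      have hn : n = (totalN d : Int) + (offN : Int) := by omega
      rw [hn]
      push_cast
      ring
    rw [hsum, hidx]

-- walking A's outer loop over the blocks
lemma awalk (k : Nat) : ∀ (d : Nat) (n : Int) (fa : Nat), 1 ≤ d → d + k ≤ 9 → k < fa →
    (totalN d : Int) ≤ n → n < (totalN (d + k + 1) : Int) →
    ∃ j : Nat, (cum j : Int) ≤ n ∧ n < (cum (j + 1) : Int) ∧ j ≤ n.toNat ∧
      dnA fa (startN d) (d : Int) (n - (totalN d : Int)) = retB j n := by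
  induction k with
  | zero =>
    intro d n fa hd hk hfa hlo hhi
    obtain ⟨fa, rfl⟩ : ∃ f, fa = f + 1 := ⟨fa - 1, by omega⟩
    exact ablock fa d n hd (by omega) hlo (le_of_lt hhi)
  | succ k ih =>
    intro d n fa hd hk hfa hlo hhi
    obtain ⟨fa, rfl⟩ : ∃ f, fa = f + 1 := ⟨fa - 1, by omega⟩
    by_cases hcase : n ≤ (totalN (d + 1) : Int)
    · exact ablock fa d n hd (by omega) hlo hcase
    · have step : dnA (fa + 1) (startN d) (d : Int) (n - (totalN d : Int)) =
          dnA fa (startN (d + 1)) ((d + 1 : Nat) : Int) (n - (totalN (d + 1) : Int)) := by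
        rw [dnA]
        simp only []
        rw [if_pos (by omega), Int.toNat_natCast, nines d hd (by omega)]
        simp only [Option.getD_some]
        rw [numnum_cast d]
        rw [if_neg (by rw [totalN_succ_cast d hd] at hcase; omega)]
        have e1 : ((10:Int) ^ d - 1) + 1 = ((startN (d + 1) : Nat) : Int) := by
          rw [startN_succ d hd]; push_cast; ring
        have e2 : (d : Int) + 1 = ((d + 1 : Nat) : Int) := by push_cast; ring
        have e3 : n - (totalN d : Int) - ((cntN d * d : Nat) : Int) = n - ((totalN (d + 1) : Nat) : Int) := by
          rw [totalN_succ_cast d hd]; ring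
        rw [e1, e2, e3]
      rw [step]
      have := ih (d + 1) n fa (by omega) (by omega) (by omega) (by omega)
        (by have he : d + 1 + k + 1 = d + (k + 1) + 1 := by omega
            rw [he]; exact hhi)
      exact this

-- cum is monotone
lemma cum_le_add (a k : Nat) : cum a ≤ cum (a + k) := by
  induction k with
  | zero => simp
  | succ k ih =>
    have : cum (a + (k + 1)) = cum (a + k) + numD (a + k) := rfl
    omega

-- SS j k m = sum over i in [j, j+k) of (m - 10^i) (truncated), and the count CC of i with 10^i ≤ m
def SS : Nat → Nat → Nat → Nat
  | _, 0, _ => 0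
  | j, k+1, m => (m - 10 ^ j) + SS (j+1) k m

def CC : Nat → Nat → Nat → Nat
  | _, 0, _ => 0
  | j, k+1, m => (if 10 ^ j ≤ m then 1 else 0) + CC (j+1) k m

lemma SS_zero_of_le (k : Nat) : ∀ j m, m ≤ 10 ^ j → SS j k m = 0 := by
  induction k with
  | zero => intro j m _; rfl
  | succ k ih =>
    intro j m hm
    show (m - 10 ^ j) + SS (j+1) k m = 0
    rw [ih (j+1) m (le_trans hm (Nat.pow_le_pow_right (by norm_num) (by omega)))]
    omega

lemma SS_succ (k : Nat) : ∀ j m, SS j k (m + 1) = SS j k m + CC j k m := by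
  induction k with
  | zero => intro j m; rfl
  | succ k ih =>
    intro j m
    show (m + 1 - 10 ^ j) + SS (j+1) k (m+1) = ((m - 10 ^ j) + SS (j+1) k m) + ((if 10 ^ j ≤ m then 1 else 0) + CC (j+1) k m)
    rw [ih (j+1) m]
    split_ifs with h <;> omega

lemma CC_threshold (k : Nat) : ∀ j e m, (∀ i, j ≤ i → i < j + k → (10 ^ i ≤ m ↔ i < e)) →
    CC j k m = min (j + k) e - j := by
  induction k with
  | zero => intro j e m _; simp only [CC]; omega
  | succ k ih =>
    intro j e m hiff
    show (if 10 ^ j ≤ m then 1 else 0) + CC (j+1) k m = min (j + (k+1)) e - j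
    rw [ih (j+1) e m (fun i h1 h2 => hiff i (by omega) (by omega))]
    have hj := hiff j (le_refl j) (by omega)
    split_ifs with h
    · have : j < e := hj.mp h
      omega
    · have : ¬ j < e := fun hlt => h (hj.mpr hlt)
      omega

-- every m < 10^10 lies in a digit-length block
lemma block_of (m : Nat) (hm : m < 10 ^ 10) :
    ∃ d, 1 ≤ d ∧ d ≤ 10 ∧ m < 10 ^ d ∧ (10 ^ (d - 1) ≤ m ∨ d = 1) := by
  by_cases h0 : m = 0
  · exact ⟨1, le_refl 1, by omega, by omega, Or.inr rfl⟩
  · refine ⟨Nat.log 10 m + 1, by omega, ?_, ?_, Or.inl ?_⟩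
    · have := Nat.log_lt_of_lt_pow h0 hm
      omega
    · exact Nat.lt_pow_succ_log_self (by norm_num) m
    · simpa using Nat.pow_log_le_self 10 h0

lemma ident : ∀ m, m ≤ 10 ^ 10 → cum m = m + SS 1 10 m := by
  intro m
  induction m with
  | zero =>
    intro _
    rw [SS_zero_of_le 10 1 0 (by norm_num)]
    rfl
  | succ m ih =>
    intro hm
    obtain ⟨d, hd1, hd10, hdlt, hdlo⟩ := block_of m (by omega)
    have hnum : numD m = d := by
      apply numD_eq d m hd1 hdlt hdlo
    have hiff : ∀ i, 1 ≤ i → i < 1 + 10 → (10 ^ i ≤ m ↔ i < d) := by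
      intro i h1 _
      constructor
      · intro h
        by_contra hc
        have : 10 ^ d ≤ 10 ^ i := Nat.pow_le_pow_right (by norm_num) (by omega)
        omega
      · intro hlt
        rcases hdlo with h | h
        · exact le_trans (Nat.pow_le_pow_right (by norm_num) (by omega)) h
        · omega
    have hCC : CC 1 10 m = d - 1 := by
      rw [CC_threshold 10 1 d m hiff]
      omega
    have hstep : cum (m + 1) = cum m + numD m := rfl
    rw [hstep, SS_succ 10 1 m, ih (by omega), hnum, hCC]
    omega

-- the cum-loop of the port computes SS
lemma cumB_run (k : Nat) : ∀ (j fuel : Nat) (mN : Nat) (t : Int), k ≤ fuel → mN ≤ 10 ^ (j + k) →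
    cumB fuel (mN : Int) t (((10 : Nat) ^ j : Nat) : Int) = t + ((SS j k mN : Nat) : Int) := by
  induction k with
  | zero =>
    intro j fuel mN t _ hm
    have hle : ¬ (((10 : Nat) ^ j : Nat) : Int) < (mN : Int) := by
      simp only [Nat.add_zero] at hm
      exact_mod_cast not_lt.mpr hm
    obtain hf | ⟨f, rfl⟩ : fuel = 0 ∨ ∃ f, fuel = f + 1 := by
      rcases fuel with _ | f
      · exact Or.inl rfl
      · exact Or.inr ⟨f, rfl⟩
    · subst hf; show t = t + _; show t = t + ((SS j 0 mN : Nat) : Int); simp [SS]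
    · rw [cumB, if_neg hle]
      show t = t + ((SS j 0 mN : Nat) : Int)
      simp [SS]
  | succ k ih =>
    intro j fuel mN t hfuel hm
    obtain ⟨f, rfl⟩ : ∃ f, fuel = f + 1 := ⟨fuel - 1, by omega⟩
    rw [cumB]
    by_cases hlt : (((10 : Nat) ^ j : Nat) : Int) < (mN : Int)
    · rw [if_pos hlt]
      have hltN : 10 ^ j < mN := by exact_mod_cast hlt
      have e1 : (((10 : Nat) ^ j : Nat) : Int) * 10 = (((10 : Nat) ^ (j + 1) : Nat) : Int) := by
        push_cast; ring
      have e2 : t + ((mN : Int) - (((10 : Nat) ^ j : Nat) : Int)) = t + ((mN - 10 ^ j : Nat) : Int) := by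
        rw [Nat.cast_sub (by omega)]
      rw [e1, e2, ih (j + 1) f mN _ (by omega) (by
        have : j + 1 + k = j + (k + 1) := by omega
        rw [this]; exact hm)]
      show _ = t + ((SS j (k+1) mN : Nat) : Int)
      have hSS : SS j (k+1) mN = (mN - 10 ^ j) + SS (j+1) k mN := rfl
      rw [hSS]
      push_cast
      ring
    · rw [if_neg hlt]
      have hleN : mN ≤ 10 ^ j := by
        have := not_lt.mp hlt
        exact_mod_cast this
      rw [SS_zero_of_le (k+1) j mN hleN]
      simp

lemma cumB_cum (mN : Nat) (hm : mN ≤ 10 ^ 10) :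
    cumB 64 (mN : Int) (mN : Int) 10 = ((cum mN : Nat) : Int) := by
  have h10 : (10 : Int) = (((10 : Nat) ^ 1 : Nat) : Int) := by norm_num
  rw [h10, cumB_run 10 1 64 mN (mN : Int) (by omega) (by
    calc mN ≤ 10 ^ 10 := hm
      _ ≤ 10 ^ (1 + 10) := Nat.pow_le_pow_right (by norm_num) (by omega))]
  rw [ident mN hm]
  push_cast
  ring

-- the binary search returns the number whose digits cover position n
lemma bsearch_ok (fuel : Nat) : ∀ (a b : Nat) (n : Int), a < b → b ≤ 10 ^ 10 →
    b - a ≤ 2 ^ fuel → (cum a : Int) ≤ n → n < (cum b : Int) →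
    ∃ j : Nat, a ≤ j ∧ j < b ∧ (cum j : Int) ≤ n ∧ n < (cum (j + 1) : Int) ∧
      dnBs fuel n (a : Int) (b : Int) = (j : Int) := by
  induction fuel with
  | zero =>
    intro a b n hab hb hfuel hlo hhi
    have hb1 : b = a + 1 := by omega
    subst hb1
    exact ⟨a, le_refl a, by omega, hlo, hhi, rfl⟩
  | succ fuel ih =>
    intro a b n hab hb hfuel hlo hhi
    rw [dnBs]
    by_cases hgap : b - a ≤ 1
    · have hb1 : b = a + 1 := by omega
      subst hb1
      rw [if_neg (by omega)]
      exact ⟨a, le_refl a, by omega, hlo, hhi, rfl⟩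
    · rw [if_pos (by omega)]
      have hmid : PySem.Int.floordiv ((a : Int) + (b : Int)) 2 = (((a + b) / 2 : Nat) : Int) := by
        have : (a : Int) + (b : Int) = ((a + b : Nat) : Int) := by push_cast; ring
        rw [this]
        exact_mod_cast PySem.Int.floordiv_natCast (a + b) 2
      set mN := (a + b) / 2 with hmN
      have hm1 : a < mN := by omega
      have hm2 : mN < b := by omega
      rw [hmid]
      have hzeta : (if cumB 64 ((mN : Nat) : Int) ((mN : Nat) : Int) 10 ≤ n then
            dnBs fuel n ((mN : Nat) : Int) ((b : Nat) : Int)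
          else dnBs fuel n ((a : Nat) : Int) ((mN : Nat) : Int)) =
          (let mid : Int := ((mN : Nat) : Int);
            if cumB 64 mid mid 10 ≤ n then dnBs fuel n mid ((b : Nat) : Int)
            else dnBs fuel n ((a : Nat) : Int) mid) := rfl
      rw [← hzeta, cumB_cum mN (by omega)]
      by_cases hc : ((cum mN : Nat) : Int) ≤ n
      · rw [if_pos hc]
        obtain ⟨j, hj1, hj2, hj3, hj4, hj5⟩ := ih mN b n hm2 hb (by omega) hc hhi
        exact ⟨j, by omega, hj2, hj3, hj4, hj5⟩
      · rw [if_neg hc]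
        obtain ⟨j, hj1, hj2, hj3, hj4, hj5⟩ := ih a mN n hm1 (by omega) (by omega) hlo (by omega)
        exact ⟨j, hj1, by omega, hj3, hj4, hj5⟩

-- the covering number is unique
lemma cover_unique (j j' : Nat) (n : Int) (h1 : (cum j : Int) ≤ n) (h2 : n < (cum (j + 1) : Int))
    (h3 : (cum j' : Int) ≤ n) (h4 : n < (cum (j' + 1) : Int)) : j = j' := by
  by_contra hne
  rcases Nat.lt_or_ge j j' with h | h
  · have : cum (j + 1) ≤ cum j' := by
      have := cum_le_add (j + 1) (j' - (j + 1))
      have he : j + 1 + (j' - (j + 1)) = j' := by omega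
      rwa [he] at this
    have : ((cum (j + 1) : Nat) : Int) ≤ ((cum j' : Nat) : Int) := by exact_mod_cast this
    omega
  · have hj : j' < j := by omega
    have : cum (j' + 1) ≤ cum j := by
      have := cum_le_add (j' + 1) (j - (j' + 1))
      have he : j' + 1 + (j - (j' + 1)) = j := by omega
      rwa [he] at this
    have : ((cum (j' + 1) : Nat) : Int) ≤ ((cum j : Nat) : Int) := by exact_mod_cast this
    omega

-- ===== VERDICT (by name: the statement is the Claim_ definition above) =====
theorem dn_spec : Claim_equal_dn := by
  intro n hdom hpre
  unfold Dom_dn pvDomInt at hdom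
  simp only [decide_eq_true_eq] at hdom
  unfold Spec_dn dn dn_alt
  rw [if_neg (by exact not_lt.mpr hpre)]
  have hT : ((totalN 10 : Nat) : Int) = 8888888890 := by
    norm_num [totalN, cntN, startN]
  obtain ⟨j, hj1, hj2, hj3, hjA⟩ := awalk 8 1 n 64 (by omega) (by omega) (by omega)
    (by show ((totalN 1 : Nat) : Int) ≤ n; simpa [totalN] using hpre)
    (by show n < ((totalN (1 + 8 + 1) : Nat) : Int); rw [hT]; omega)
  have hA' : dnA 64 0 1 n = retB j n := by
    have h1 : ((startN 1 : Nat) : Int) = 0 := by norm_num [startN]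
    have h2 : ((totalN 1 : Nat) : Int) = 0 := by norm_num [totalN]
    rw [h1, h2] at hjA
    simpa using hjA
  -- run the binary search
  have hbN : n.toNat + 1 ≤ 10 ^ 10 := by omega
  have hcumb : n < (cum (n.toNat + 1) : Int) := by
    have := ident (n.toNat + 1) hbN
    have : n.toNat + 1 ≤ cum (n.toNat + 1) := by omega
    have : ((n.toNat + 1 : Nat) : Int) ≤ ((cum (n.toNat + 1) : Nat) : Int) := by exact_mod_cast this
    omega
  obtain ⟨j', _, hj'b, hc1, hc2, hrun⟩ := bsearch_ok 64 0 (n.toNat + 1) n (by omega) hbN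
    (by omega) (by show ((cum 0 : Nat) : Int) ≤ n; exact_mod_cast hpre) hcumb
  have hjj : j = j' := cover_unique j j' n hj1 hj2 hc1 hc2
  have hcast : ((n.toNat + 1 : Nat) : Int) = n + 1 := by omega
  rw [hcast] at hrun
  have hz : ((0 : Nat) : Int) = (0 : Int) := rfl
  rw [hz] at hrun
  rw [hA', hjj]
  have hzeta : (let lo := dnBs 64 n 0 (n + 1);
      ((PySem.List.pyGet? (PySem.Int.toChars lo) (n - cumB 64 lo lo 10)).bind
        (fun c => PySem.Int.ofChars? [c])).getD 0) =
      ((PySem.List.pyGet? (PySem.Int.toChars (dnBs 64 n 0 (n + 1)))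
          (n - cumB 64 (dnBs 64 n 0 (n + 1)) (dnBs 64 n 0 (n + 1)) 10)).bind
        (fun c => PySem.Int.ofChars? [c])).getD 0 := rfl
  rw [hzeta, hrun, cumB_cum j' (by omega)]
  rfl
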